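-- pv_equiv track=rewrite | github.com/subkar/indra | models/RAF_module/enumerate_rules.py | get_site_combs
-- ===== SOURCE A (Python) =====
-- def get_site_combs(comb, rule_sites):
--     h = []
--     st = 0
--     en = 0
--
--     for reactant_sites in rule_sites:
--         en = st + len(reactant_sites)
--         pr = comb[st: en]
--         # print 'pr: %s' % pr
--         d = dict(zip(reactant_sites, pr))
--         h.append(d.copy())
--         st += len(reactant_sites)
--     return h
-- ===== SOURCE B (Python) =====
-- def get_site_combs(comb, rule_sites):
--     h = [{} for _ in rule_sites]
--     flat = [(gi, site) for gi, sites in enumerate(rule_sites) for site in sites]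
--     for (gi, site), v in zip(flat, comb):
--         h[gi][site] = v
--     return h
-- ===== Notes on version B (the rewrite author's own statement) =====
-- stated objective: alternative
-- what changed: Replaces A's sequential offset-and-slice chunking with a flatten-and-scatter scheme: pre-allocate one empty dict per group, build a flat list of (group index, site) tags in a staged pass, then distribute comb's values into the dicts by tag in a single zip-driven scatter loop; no st/en offsets and no slices exist.
import Mathlib
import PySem

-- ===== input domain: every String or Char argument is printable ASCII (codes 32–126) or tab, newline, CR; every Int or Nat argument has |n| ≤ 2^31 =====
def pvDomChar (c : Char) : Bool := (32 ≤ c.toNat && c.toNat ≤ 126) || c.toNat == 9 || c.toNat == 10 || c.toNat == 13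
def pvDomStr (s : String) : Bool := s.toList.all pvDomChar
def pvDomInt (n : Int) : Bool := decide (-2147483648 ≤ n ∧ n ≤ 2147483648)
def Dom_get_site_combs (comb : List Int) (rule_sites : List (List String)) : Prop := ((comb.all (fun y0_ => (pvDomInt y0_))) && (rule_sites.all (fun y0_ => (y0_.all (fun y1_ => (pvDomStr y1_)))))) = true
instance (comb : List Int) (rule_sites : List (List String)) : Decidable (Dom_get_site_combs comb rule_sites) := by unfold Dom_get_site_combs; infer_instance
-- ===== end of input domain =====

-- B replaces A's offset-and-slice chunking with flatten-and-scatter: pre-allocated per-group dicts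
-- filled from a flat (group index, site) tag list zipped with comb (alternative decomposition; same cost).

-- ===== PORT A =====
-- A: fold over rule_sites carrying (h, st); pr = comb[st:en]; d = dict(zip(sites, pr)); h.append(d.copy())
def get_site_combs (comb : List Int) (rule_sites : List (List String)) : List (List (String × Int)) :=
  (rule_sites.foldl
    (fun (acc : List (List (String × Int)) × Int) reactant_sites =>
      let en : Int := acc.2 + (reactant_sites.length : Int)
      let pr := PySem.List.slice comb (some acc.2) (some en)
      let d := PySem.Dict.ofList (reactant_sites.zip pr)
      (acc.1 ++ [d.items], acc.2 + (reactant_sites.length : Int)))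
    ([], 0)).1

-- ===== PORT B =====
-- B: h = [{} for _ in rule_sites]; flat = [(gi, site) …]; for (gi, site), v in zip(flat, comb): h[gi][site] = v
-- (gi from enumerate is always a valid nonnegative index, so h[gi] = … is List.modify at gi.toNat, exact here)
def get_site_combs_alt (comb : List Int) (rule_sites : List (List String)) : List (List (String × Int)) :=
  let h0 : List (PySem.Dict String Int) := rule_sites.map (fun _ => PySem.Dict.empty)
  let flat : List (Int × String) :=
    (PySem.List.enumerate rule_sites).flatMap (fun p => p.2.map (fun site => (p.1, site)))
  let h := (flat.zip comb).foldl
    (fun h q => h.modify q.1.1.toNat (fun d => d.insert q.1.2 q.2)) h0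
  h.map (fun d => d.items)

-- ===== PRECONDITION & SPEC =====
def Spec_get_site_combs (comb : List Int) (rule_sites : List (List String)) (out : List (List (String × Int))) : Prop := out = get_site_combs_alt comb rule_sites
instance (comb : List Int) (rule_sites : List (List String)) (out : List (List (String × Int))) : Decidable (Spec_get_site_combs comb rule_sites out) := by unfold Spec_get_site_combs; infer_instance

-- ===== CLAIM =====
def Claim_equal_get_site_combs : Prop := ∀ (comb : List Int) (rule_sites : List (List String)), Dom_get_site_combs comb rule_sites → Spec_get_site_combs comb rule_sites (get_site_combs comb rule_sites)

-- ===== LEMMAS AND PROOFS =====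

-- proof-only bridge: the per-chunk dicts both programs end up with
def pvDictChunks (rest : List Int) (rule_sites : List (List String)) : List (PySem.Dict String Int) :=
  match rule_sites with
  | [] => []
  | sites :: more =>
      PySem.Dict.ofList (sites.zip rest) :: pvDictChunks (rest.drop sites.length) more

-- zip ignores elements of the right list past the left list's length
theorem pv_zip_take {α β : Type} (xs : List α) (ys : List β) :
    xs.zip (ys.take xs.length) = xs.zip ys := by
  induction xs generalizing ys with
  | nil => simp
  | cons x xs ih =>
    cases ys with
    | nil => simp
    | cons y ys => simp [List.zip_cons_cons, ih]

theorem pv_zip_append {α β : Type} (xs ys : List α) (c : List β) :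
    (xs ++ ys).zip c = xs.zip (c.take xs.length) ++ ys.zip (c.drop xs.length) := by
  induction xs generalizing c with
  | nil => simp
  | cons x xs ih =>
    cases c with
    | nil => simp
    | cons v c => simp [List.zip_cons_cons, ih]

theorem pv_modify_append {α : Type} (pref : List α) (d : α) (hs : List α) (f : α → α) :
    (pref ++ d :: hs).modify pref.length f = pref ++ f d :: hs := by
  induction pref with
  | nil => simp [List.modify]
  | cons p pref ih => simpa [List.modify] using ih

-- scattering a run of pairs all aimed at the same index only rebuilds that slot
theorem pv_scatter_fixed (l : List (String × Int)) (pref : List (PySem.Dict String Int))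
    (d : PySem.Dict String Int) (hs : List (PySem.Dict String Int)) :
    l.foldl (fun h q => h.modify pref.length (fun d' => d'.insert q.1 q.2)) (pref ++ d :: hs)
      = pref ++ (l.foldl (fun d' q => d'.insert q.1 q.2) d) :: hs := by
  induction l generalizing d with
  | nil => rfl
  | cons q l ih => simp only [List.foldl_cons, pv_modify_append, ih]

theorem pv_ofList_foldl (l : List (String × Int)) :
    l.foldl (fun d' q => d'.insert q.1 q.2) PySem.Dict.empty = PySem.Dict.ofList l := rfl

-- the scatter loop, run on tags starting at index pref.length over untouched pref, chunks comb
theorem pv_scatter (rule_sites : List (List String)) (comb : List Int)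
    (pref : List (PySem.Dict String Int)) :
    (((PySem.List.enumerate rule_sites (pref.length : Int)).flatMap
        (fun p => p.2.map (fun site => (p.1, site)))).zip comb).foldl
      (fun h q => h.modify q.1.1.toNat (fun d => d.insert q.1.2 q.2))
      (pref ++ rule_sites.map (fun _ => PySem.Dict.empty))
    = pref ++ pvDictChunks comb rule_sites := by
  induction rule_sites generalizing comb pref with
  | nil => simp [pvDictChunks, PySem.List.enumerate]
  | cons sites more ih =>
    rw [PySem.List.enumerate_cons]
    simp only [List.flatMap_cons, pv_zip_append, List.foldl_append, List.map_cons]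
    rw [List.zip_map_left, List.foldl_map]
    simp only [Prod.map, id, Int.toNat_natCast, List.length_map]
    rw [pv_scatter_fixed, pv_ofList_foldl]
    have hlen : ((pref.length : Int) + 1) = (((pref ++ [PySem.Dict.ofList (sites.zip (comb.take sites.length))]).length : Int)) := by
      simp
    rw [hlen]
    have := ih (comb.drop sites.length) (pref ++ [PySem.Dict.ofList (sites.zip (comb.take sites.length))])
    simp only [List.append_assoc, List.singleton_append, pv_zip_take] at this
    simpa [pvDictChunks, pv_zip_take] using this

-- A's fold produces the items of the same chunk dicts
theorem pv_foldl_chunks (rule_sites : List (List String)) (comb : List Int)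
    (acc : List (List (String × Int))) (st : Nat) :
    (rule_sites.foldl
      (fun (a : List (List (String × Int)) × Int) reactant_sites =>
        let en : Int := a.2 + (reactant_sites.length : Int)
        let pr := PySem.List.slice comb (some a.2) (some en)
        let d := PySem.Dict.ofList (reactant_sites.zip pr)
        (a.1 ++ [d.items], a.2 + (reactant_sites.length : Int)))
      (acc, (st : Int))).1
    = acc ++ (pvDictChunks (comb.drop st) rule_sites).map (fun d => d.items) := by
  induction rule_sites generalizing acc st with
  | nil => simp [pvDictChunks]
  | cons sites more ih =>
    simp only [List.foldl_cons]
    have hslice : PySem.List.slice comb (some (st : Int)) (some ((st : Int) + (sites.length : Int)))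
        = (comb.drop st).take sites.length := PySem.List.slice_natCast_add comb st sites.length
    have hst : (st : Int) + (sites.length : Int) = ((st + sites.length : Nat) : Int) := by
      push_cast; ring
    rw [hslice]
    rw [show ((st : Int) + (sites.length : Int)) = ((st + sites.length : Nat) : Int) from hst]
    rw [ih]
    simp [pvDictChunks, pv_zip_take, List.drop_drop, Nat.add_comm st sites.length]

-- ===== VERDICT =====
theorem get_site_combs_spec : Claim_equal_get_site_combs := by
  intro comb rule_sites _
  show get_site_combs comb rule_sites = get_site_combs_alt comb rule_sites
  have hA := pv_foldl_chunks rule_sites comb [] 0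
  have hB := pv_scatter rule_sites comb []
  simp only [List.drop_zero, List.nil_append, List.length_nil, Int.natCast_zero] at hA hB
  simp only [get_site_combs, get_site_combs_alt, hB]
  exact hA
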